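-- pv_equiv track=rewrite | github.com/mrbaker1917/AoC2025 | day3.py | find_12_largest
-- ===== SOURCE A (Python) =====
-- def find_12_largest(s):
--     while len(s) > 12:
--         # Find the leftmost position where s[i] < s[i+1]
--         removed = False
--         for i in range(len(s) - 1):
--             if s[i] < s[i + 1]:
--                 s = s[:i] + s[i+1:]
--                 removed = True
--                 break
--         # If no such position exists, remove the last digit
--         if not removed:
--             s = s[:-1]
--     return s
-- ===== SOURCE B (Python) =====
-- def find_12_largest(s):
--     k = max(len(s) - 12, 0)
--     stack = []
--     for c in s:
--         while k > 0 and stack and stack[-1] < c: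
--             stack.pop()
--             k -= 1
--         stack.append(c)
--     return "".join(stack[:len(stack) - k])
-- ===== Notes on version B (the rewrite author's own statement) =====
-- stated objective: faster
-- what changed: Replaced A's repeat-until-short loop that rescans the string for the leftmost ascent and rebuilds it by slicing each iteration with a single left-to-right monotonic-stack pass carrying a removal budget of len(s)-12.
import Mathlib
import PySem

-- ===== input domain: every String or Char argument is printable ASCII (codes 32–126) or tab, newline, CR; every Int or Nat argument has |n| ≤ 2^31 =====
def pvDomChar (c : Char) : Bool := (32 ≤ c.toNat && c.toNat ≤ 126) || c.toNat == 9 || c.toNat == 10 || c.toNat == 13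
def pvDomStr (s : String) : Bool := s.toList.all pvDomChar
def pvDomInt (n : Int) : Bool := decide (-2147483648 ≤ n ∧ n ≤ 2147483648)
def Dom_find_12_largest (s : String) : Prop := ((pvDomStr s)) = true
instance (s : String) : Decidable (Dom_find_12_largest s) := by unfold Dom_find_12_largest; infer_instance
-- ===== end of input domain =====

-- B replaces A's quadratic "repeatedly delete at the leftmost ascent" loop by a single
-- left-to-right monotonic-stack pass with a removal budget (objective: faster).

-- ===== PORT A =====
-- one iteration of A's while-body: remove the char at the leftmost i with s[i] < s[i+1],
-- else (no such i) drop the last char (s[:-1])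
def pvStepA : List Char → List Char
  | [] => []
  | [_] => []
  | a :: b :: t => if a < b then b :: t else a :: pvStepA (b :: t)

-- needed by pvRunA's termination: each while-iteration shortens s by one
theorem pvStepA_length (l : List Char) : (pvStepA l).length = l.length - 1 := by
  induction l with
  | nil => simp [pvStepA]
  | cons a t ih =>
    cases t with
    | nil => simp [pvStepA]
    | cons b t' =>
      simp only [pvStepA]
      split
      · simp
      · simp only [List.length_cons] at ih ⊢; omega

-- A's while-loop: repeat pvStepA until the length is ≤ 12
def pvRunA (l : List Char) : List Char :=
  if l.length ≤ 12 then l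
  else pvRunA (pvStepA l)
termination_by l.length
decreasing_by
  have := pvStepA_length l
  omega

def find_12_largest (s : String) : String := String.mk (pvRunA s.toList)

-- ===== PORT B =====
-- the inner while-loop of Source B: pop while budget > 0 and top < c (stack head = top)
def pvPop : List Char → Nat → Char → List Char × Nat
  | t :: ts, Nat.succ k, c => if t < c then pvPop ts k c else (t :: ts, Nat.succ k)
  | st, k, _ => (st, k)

-- one step of Source B's for-loop: pop, then push c
def pvStepB (p : List Char × Nat) (c : Char) : List Char × Nat :=
  let q := pvPop p.1 p.2 c
  (c :: q.1, q.2)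

-- Source B after the for-loop: stack[:len(stack)-k] (the stack is kept top-first here, so reverse)
def pvFinishB (p : List Char × Nat) : List Char :=
  List.take (p.1.length - p.2) p.1.reverse

def pvRunB (l : List Char) (k : Nat) : List Char :=
  pvFinishB (l.foldl pvStepB ([], k))

def find_12_largest_alt (s : String) : String :=
  String.mk (pvRunB s.toList (s.toList.length - 12))

-- ===== PRECONDITION & SPEC =====
def Spec_find_12_largest (s : String) (out : String) : Prop := out = find_12_largest_alt s
instance (s : String) (out : String) : Decidable (Spec_find_12_largest s out) := by unfold Spec_find_12_largest; infer_instance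

-- ===== CLAIM (what is proved, stated in full; the proofs are below) =====
def Claim_equal_find_12_largest : Prop := ∀ (s : String), Dom_find_12_largest s → Spec_find_12_largest s (find_12_largest s)

-- ===== LEMMAS AND PROOFS =====

-- with zero budget pvPop never pops
theorem pvPop_zero (st : List Char) (c : Char) : pvPop st 0 c = (st, 0) := by
  cases st <;> simp [pvPop]

-- with zero budget the fold just reverses the input onto the stack
theorem pvFold_zero (l st : List Char) :
    l.foldl pvStepB (st, 0) = (l.reverse ++ st, 0) := by
  induction l generalizing st with
  | nil => simp
  | cons c t ih => simp [pvStepB, pvPop_zero, ih]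

-- pvPop does nothing when the stack top does not ascend to c
theorem pvPop_nopop (st : List Char) (k : Nat) (c : Char)
    (h : ∀ t, st.head? = some t → c ≤ t) : pvPop st k c = (st, k) := by
  cases st with
  | nil => cases k <;> simp [pvPop]
  | cons t ts =>
    cases k with
    | zero => simp [pvPop]
    | succ k' => simp [pvPop, not_lt.mpr (h t rfl)]

-- processing a non-ascending run from a compatible stack does no pops
theorem pvFold_chain (q : List Char) (st : List Char) (k : Nat)
    (hq : q.IsChain (fun a b => b ≤ a))
    (hb : ∀ t c, st.head? = some t → q.head? = some c → c ≤ t) :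
    q.foldl pvStepB (st, k) = (q.reverse ++ st, k) := by
  induction q generalizing st with
  | nil => simp
  | cons c t ih =>
    have hpop : pvPop st k c = (st, k) := by
      apply pvPop_nopop
      intro x hx
      exact hb x c hx rfl
    have hstep : pvStepB (st, k) c = (c :: st, k) := by
      simp [pvStepB, hpop]
    have ht : t.IsChain (fun a b => b ≤ a) := hq.tail
    have hb' : ∀ t' c', (c :: st).head? = some t' → t.head? = some c' → c' ≤ t' := by
      intro t' c' h1 h2
      simp only [List.head?_cons, Option.some.injEq] at h1
      subst h1
      exact (List.isChain_cons.mp hq).1 c' h2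
    calc (c :: t).foldl pvStepB (st, k) = t.foldl pvStepB (c :: st, k) := by
          simp [List.foldl_cons, hstep]
      _ = (t.reverse ++ (c :: st), k) := ih (c :: st) ht hb'
      _ = ((c :: t).reverse ++ st, k) := by simp

-- a step of A on a wholly non-ascending string drops the last char
theorem pvStepA_noasc (q : List Char) (hq : q.IsChain (fun a b => b ≤ a)) :
    pvStepA q = q.dropLast := by
  induction q with
  | nil => simp [pvStepA]
  | cons a t ih =>
    cases t with
    | nil => simp [pvStepA]
    | cons b t' =>
      have h1 : b ≤ a := (List.isChain_cons_cons.mp hq).1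
      simp only [pvStepA, if_neg (not_lt.mpr h1)]
      rw [ih hq.tail]
      simp

-- a step of A when the first ascent is at the boundary q/t < c: removes t
theorem pvStepA_asc (q : List Char) (t c : Char) (rest : List Char)
    (hq : (q ++ [t]).IsChain (fun a b => b ≤ a)) (htc : t < c) :
    pvStepA (q ++ t :: c :: rest) = q ++ c :: rest := by
  induction q with
  | nil => simp [pvStepA, htc]
  | cons a q' ih =>
    have hq' : (q' ++ [t]).IsChain (fun a b => b ≤ a) := by
      have := hq.tail
      simpa using this
    have hhead : ∀ x ∈ (q' ++ [t]).head?, x ≤ a := by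
      have := (List.isChain_cons.mp (by simpa using hq)).1
      simpa using this
    cases q' with
    | nil =>
      have hat : t ≤ a := hhead t (by simp)
      simp only [List.nil_append] at ih
      simp only [List.cons_append, List.nil_append, pvStepA, if_neg (not_lt.mpr hat)]
      simp only [if_pos htc]
    | cons b q'' =>
      have hab : b ≤ a := hhead b (by simp)
      simp only [List.cons_append, pvStepA, if_neg (not_lt.mpr hab)] at *
      rw [ih hq']

-- the key invariant: one unit of budget equals one leftmost-ascent removal of A
theorem pvMainInv (l : List Char) (st : List Char) (k : Nat)
    (hst : st.IsChain (fun a b => a ≤ b)) :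
    pvFinishB (l.foldl pvStepB (st, k + 1)) = pvRunB (pvStepA (st.reverse ++ l)) k := by
  induction l generalizing st k with
  | nil =>
    have hrev : st.reverse.IsChain (fun a b => b ≤ a) := by
      rw [List.isChain_reverse]
      exact hst
    rw [List.append_nil, pvStepA_noasc _ hrev]
    have hdl : st.reverse.dropLast.IsChain (fun a b => b ≤ a) :=
      hrev.prefix (List.dropLast_prefix _)
    unfold pvRunB
    rw [pvFold_chain _ [] k hdl (by simp)]
    unfold pvFinishB
    simp only [List.foldl_nil, List.append_nil, List.reverse_reverse, List.length_reverse,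
      List.length_dropLast]
    have h1 : st.reverse.dropLast = st.reverse.take (st.length - 1) := by
      rw [List.dropLast_eq_take]
      simp
    rw [h1, List.take_take]
    congr 1
    omega
  | cons c rest ih =>
    cases st with
    | nil =>
      have h0 : pvStepB ([], k + 1) c = ([c], k + 1) := by
        simp [pvStepB, pvPop]
      rw [List.foldl_cons, h0]
      have := ih (st := [c]) (k := k) (by simp)
      simpa using this
    | cons t st' =>
      by_cases htc : t < c
      · -- pop t; A removes t (the leftmost ascent is at the boundary)
        have hq : (st'.reverse ++ [t]).IsChain (fun a b => b ≤ a) := by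
          have : (t :: st').reverse.IsChain (fun a b => b ≤ a) := by
            rw [List.isChain_reverse]; exact hst
          simpa using this
        have hstepA : pvStepA ((t :: st').reverse ++ c :: rest) = st'.reverse ++ c :: rest := by
          have he : (t :: st').reverse ++ c :: rest = st'.reverse ++ t :: c :: rest := by simp
          rw [he]
          exact pvStepA_asc st'.reverse t c rest hq htc
        rw [hstepA]
        unfold pvRunB
        rw [List.foldl_append]
        have hchain' : st'.reverse.IsChain (fun a b => b ≤ a) := by
          rw [List.isChain_reverse]
          exact hst.tail
        rw [pvFold_chain _ [] k hchain' (by simp)]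
        simp only [List.append_nil, List.reverse_reverse]
        have hL : pvStepB (t :: st', k + 1) c = pvStepB (st', k) c := by
          simp [pvStepB, pvPop, htc]
        rw [List.foldl_cons, hL, ← List.foldl_cons]
      · -- keep t; push c and recurse with stack c :: t :: st'
        have hL : pvStepB (t :: st', k + 1) c = (c :: t :: st', k + 1) := by
          simp [pvStepB, pvPop, htc]
        rw [List.foldl_cons, hL]
        have hch : (c :: t :: st').IsChain (fun a b => a ≤ b) :=
          List.isChain_cons_cons.mpr ⟨not_lt.mp htc, hst⟩
        have := ih (st := c :: t :: st') (k := k) hch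
        simpa using this

-- zero budget: B returns the input unchanged
theorem pvRunB_zero (l : List Char) : pvRunB l 0 = l := by
  unfold pvRunB
  rw [pvFold_zero]
  unfold pvFinishB
  simp

-- A's loop run to completion equals B's single pass with budget = excess length
theorem pvMain (e : Nat) : ∀ l : List Char, l.length - 12 = e → pvRunA l = pvRunB l e := by
  induction e with
  | zero =>
    intro l hl
    rw [pvRunA, if_pos (by omega), pvRunB_zero]
  | succ e' ih =>
    intro l hl
    rw [pvRunA, if_neg (by omega)]
    have h1 : pvRunA (pvStepA l) = pvRunB (pvStepA l) e' := by
      apply ih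
      rw [pvStepA_length]
      omega
    rw [h1]
    have := pvMainInv l [] e' (by simp)
    simpa [pvRunB] using this.symm

-- ===== VERDICT (by name: the statement is the Claim_ definition above) =====
theorem find_12_largest_spec : Claim_equal_find_12_largest := by
  intro s _
  unfold Spec_find_12_largest find_12_largest find_12_largest_alt
  rw [pvMain (s.toList.length - 12) s.toList rfl]
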